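-- pv_equiv track=rewrite | github.com/Beast-Leon/politeness_code | helper/score_generation.py | check_passed
-- ===== SOURCE A (Python) =====
-- def result_reformat(result_ls):
--     result_dic = {} # initialize result dictionary
--     for i, result in enumerate(result_ls):
--         sentence = result[0]
--         category_ls = result[1]
--         sentiment = result[2]
--         for category in category_ls:
--             if category in result_dic: # check if the category is in our newly created result_dic
--                 result_dic[category].append([sentence, sentiment])
--             else:
--                 result_dic[category] = [[sentence, sentiment]]
--     return result_dic
--
-- def check_passed(result_ls, target_label, section_name = 'opening'):
--     result_dic = result_reformat(result_ls)
--     temp_pass_dic = {}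
--     for category, info in result_dic.items():
--         sentiments = map(lambda x: x[1], info)
--         passed = True
--         for sentiment in sentiments:
--             if sentiment == 'impolite':
--                 passed = False
--         temp_pass_dic[category] = passed
--     pass_dic = {}
--     for key in target_label:
--         if key in temp_pass_dic:
--             if temp_pass_dic[key] == True:
--                 pass_dic[key] = True
--             else:
--                 pass_dic[key] = False
--         else:
--             pass_dic[key] = False
--     final_pass_dic = {section_name: pass_dic}
--     return final_pass_dic
-- ===== SOURCE B (Python) =====
-- def check_passed(result_ls, target_label, section_name='opening'):
--     present = set()
--     impolite = set()
--     for result in result_ls: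
--         for category in result[1]:
--             present.add(category)
--             if result[2] == 'impolite':
--                 impolite.add(category)
--     pass_dic = {}
--     for key in target_label:
--         pass_dic[key] = key in present and key not in impolite
--     return {section_name: pass_dic}
-- ===== Notes on version B (the rewrite author's own statement) =====
-- stated objective: simpler
-- what changed: Replaces the intermediate dict of per-category (sentence, sentiment) lists and the separate sentiment-rescan loop with a single pass over result_ls maintaining two sets (categories seen, categories with an 'impolite' row); pass_dic is then read off from set membership.
import Mathlib
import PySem

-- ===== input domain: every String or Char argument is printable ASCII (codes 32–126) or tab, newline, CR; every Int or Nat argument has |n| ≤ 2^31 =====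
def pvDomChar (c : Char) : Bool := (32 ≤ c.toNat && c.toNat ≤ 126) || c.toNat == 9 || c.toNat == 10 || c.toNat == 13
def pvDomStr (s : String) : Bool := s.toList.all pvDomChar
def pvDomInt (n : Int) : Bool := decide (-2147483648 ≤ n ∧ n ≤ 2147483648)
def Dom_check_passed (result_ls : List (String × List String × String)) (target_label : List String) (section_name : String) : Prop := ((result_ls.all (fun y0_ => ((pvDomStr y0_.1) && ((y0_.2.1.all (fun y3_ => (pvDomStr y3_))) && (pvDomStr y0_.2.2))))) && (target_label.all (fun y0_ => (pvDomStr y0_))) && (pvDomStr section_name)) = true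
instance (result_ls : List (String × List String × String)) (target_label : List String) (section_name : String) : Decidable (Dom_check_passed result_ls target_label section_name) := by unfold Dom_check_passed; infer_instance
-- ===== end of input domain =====

-- B replaces A's intermediate dict of (sentence, sentiment) lists and its per-category sentiment rescan
-- by one pass over result_ls keeping two sets (categories present, categories with an impolite row); objective: simpler.

-- ===== PORT A =====
-- port of result_reformat: groups every (sentence, sentiment) pair under each of its categories, insertion order
def result_reformat (result_ls : List (String × List String × String)) : PySem.Dict String (List (String × String)) :=
  result_ls.foldl (fun d result =>
    result.2.1.foldl (fun d category =>
      if d.contains category then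
        d.insert category (d.getD category [] ++ [(result.1, result.2.2)])
      else
        d.insert category [(result.1, result.2.2)]) d) PySem.Dict.empty

def check_passed (result_ls : List (String × List String × String)) (target_label : List String) (section_name : String) : List (String × List (String × Bool)) :=
  let result_dic := result_reformat result_ls
  let temp_pass_dic := result_dic.items.foldl (fun t p =>
      t.insert p.1 (p.2.foldl (fun passed x => if x.2 == "impolite" then false else passed) true))
    PySem.Dict.empty
  let pass_dic := target_label.foldl (fun pd key =>
      if temp_pass_dic.contains key then
        if temp_pass_dic.getD key false == true then pd.insert key true
        else pd.insert key false
      else pd.insert key false) PySem.Dict.empty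
  [(section_name, pass_dic.items)]

-- ===== PORT B =====
def check_passed_alt (result_ls : List (String × List String × String)) (target_label : List String) (section_name : String) : List (String × List (String × Bool)) :=
  let sets := result_ls.foldl (fun (sets : PySem.Set String × PySem.Set String) result =>
      result.2.1.foldl (fun sets category =>
        (PySem.Set.add sets.1 category,
         if result.2.2 == "impolite" then PySem.Set.add sets.2 category else sets.2)) sets)
    (PySem.Set.empty, PySem.Set.empty)
  let pass_dic := target_label.foldl (fun pd key =>
      pd.insert key (PySem.Set.contains sets.1 key && !PySem.Set.contains sets.2 key)) PySem.Dict.empty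
  [(section_name, pass_dic.items)]

-- ===== PRECONDITION & SPEC =====
def Spec_check_passed (result_ls : List (String × List String × String)) (target_label : List String) (section_name : String) (out : List (String × List (String × Bool))) : Prop := out = check_passed_alt result_ls target_label section_name
instance (result_ls : List (String × List String × String)) (target_label : List String) (section_name : String) (out : List (String × List (String × Bool))) : Decidable (Spec_check_passed result_ls target_label section_name out) := by unfold Spec_check_passed; infer_instance

-- ===== CLAIM (what is proved, stated in full; the proofs are below) =====
def Claim_equal_check_passed : Prop := ∀ (result_ls : List (String × List String × String)) (target_label : List String) (section_name : String), Dom_check_passed result_ls target_label section_name → Spec_check_passed result_ls target_label section_name (check_passed result_ls target_label section_name)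

-- ===== LEMMAS AND PROOFS =====

-- the invariant tying A's grouping dict to B's two sets
def PassInv (d : PySem.Dict String (List (String × String))) (P I : PySem.Set String) : Prop :=
  ∀ k, d.contains k = decide (k ∈ P) ∧
       (d.getD k []).all (fun x => !(x.2 == "impolite")) = !decide (k ∈ I)

lemma set_contains_eq_decide (s : PySem.Set String) (k : String) :
    PySem.Set.contains s k = decide (k ∈ s) := by
  simp [PySem.Set.contains, List.contains_eq_mem]

lemma inv_empty : PassInv PySem.Dict.empty PySem.Set.empty PySem.Set.empty := by
  intro k
  simp [PySem.Dict.contains_empty, PySem.Dict.getD_empty, PySem.Set.empty]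

lemma inv_add (c : String) (row : String × String) (d : PySem.Dict String (List (String × String)))
    (P I : PySem.Set String) (h : PassInv d P I) :
    PassInv (d.insert c (d.getD c [] ++ [row])) (PySem.Set.add P c)
        (if row.2 == "impolite" then PySem.Set.add I c else I) := by
  intro k
  obtain ⟨h1, h2⟩ := h k
  by_cases hk : k = c
  · subst hk
    refine ⟨?_, ?_⟩
    · rw [PySem.Dict.contains_insert]
      simp [PySem.Set.mem_add]
    · rw [PySem.Dict.getD_insert]
      by_cases hs : row.2 = "impolite"
      · have hsb : (row.2 == "impolite") = true := by simpa using hs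
        simp [hsb, PySem.Set.mem_add]
      · have hsb : (row.2 == "impolite") = false := by simpa using hs
        simp [hsb, h2]
  · refine ⟨?_, ?_⟩
    · rw [PySem.Dict.contains_insert, h1]
      simp [hk, PySem.Set.mem_add]
    · rw [PySem.Dict.getD_insert, if_neg hk, h2]
      by_cases hs : row.2 = "impolite"
      · have hsb : (row.2 == "impolite") = true := by simpa using hs
        simp [hsb, PySem.Set.mem_add, hk]
      · have hsb : (row.2 == "impolite") = false := by simpa using hs
        simp [hsb]

lemma pass_fold_eq_all (info : List (String × String)) (b : Bool) :
    info.foldl (fun passed x => if x.2 == "impolite" then false else passed) b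
      = (b && info.all (fun x => !(x.2 == "impolite"))) := by
  induction info generalizing b with
  | nil => simp
  | cons x xs ih =>
      simp only [List.foldl_cons, List.all_cons, ih]
      by_cases hs : x.2 = "impolite"
      · have hsb : (x.2 == "impolite") = true := by simpa using hs
        simp [hsb]
      · have hsb : (x.2 == "impolite") = false := by simpa using hs
        simp [hsb]

-- one row of A's grouping loop, written as an unconditional insert
lemma stepA_eq (d : PySem.Dict String (List (String × String))) (c : String) (row : String × String) :
    (if d.contains c then d.insert c (d.getD c [] ++ [row]) else d.insert c [row])
      = d.insert c (d.getD c [] ++ [row]) := by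
  by_cases hc : d.contains c = true
  · simp [hc]
  · have : d.getD c [] = [] := by
      simp [PySem.Dict.getD_of_not_contains, Bool.eq_false_iff.2 hc]
    simp [hc, this]

lemma inv_cats (cs : List String) (row : String × String)
    (d : PySem.Dict String (List (String × String))) (P I : PySem.Set String)
    (h : PassInv d P I) :
    PassInv
      (cs.foldl (fun d category =>
        if d.contains category then d.insert category (d.getD category [] ++ [row])
        else d.insert category [row]) d)
      (cs.foldl (fun (sets : PySem.Set String × PySem.Set String) category =>
        (PySem.Set.add sets.1 category,
         if row.2 == "impolite" then PySem.Set.add sets.2 category else sets.2)) (P, I)).1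
      (cs.foldl (fun (sets : PySem.Set String × PySem.Set String) category =>
        (PySem.Set.add sets.1 category,
         if row.2 == "impolite" then PySem.Set.add sets.2 category else sets.2)) (P, I)).2 := by
  induction cs generalizing d P I with
  | nil => exact h
  | cons c cs ih =>
      simp only [List.foldl_cons]
      rw [stepA_eq]
      exact ih _ _ _ (inv_add c row d P I h)

lemma inv_rows (ls : List (String × List String × String))
    (d : PySem.Dict String (List (String × String))) (P I : PySem.Set String)
    (h : PassInv d P I) :
    PassInv
      (ls.foldl (fun d result =>
        result.2.1.foldl (fun d category =>
          if d.contains category then d.insert category (d.getD category [] ++ [(result.1, result.2.2)])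
          else d.insert category [(result.1, result.2.2)]) d) d)
      (ls.foldl (fun (sets : PySem.Set String × PySem.Set String) result =>
        result.2.1.foldl (fun sets category =>
          (PySem.Set.add sets.1 category,
           if result.2.2 == "impolite" then PySem.Set.add sets.2 category else sets.2)) sets) (P, I)).1
      (ls.foldl (fun (sets : PySem.Set String × PySem.Set String) result =>
        result.2.1.foldl (fun sets category =>
          (PySem.Set.add sets.1 category,
           if result.2.2 == "impolite" then PySem.Set.add sets.2 category else sets.2)) sets) (P, I)).2 := by
  induction ls generalizing d P I with
  | nil => exact h
  | cons r ls ih =>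
      simp only [List.foldl_cons]
      exact ih _ _ _ (inv_cats r.2.1 (r.1, r.2.2) d P I h)

-- A's inner grouping loop, with the branch folded away
lemma reformat_fold_eq (cs : List String) (row : String × String)
    (d : PySem.Dict String (List (String × String))) :
    cs.foldl (fun d category =>
        if d.contains category then d.insert category (d.getD category [] ++ [row])
        else d.insert category [row]) d
      = cs.foldl (fun d c => d.insert c (d.getD c [] ++ [row])) d :=
  PySem.List.foldl_congr_mem cs _ _ d (fun acc x _ => stepA_eq acc x row)

lemma nodup_keys_reformat_fold (ls : List (String × List String × String))
    (d : PySem.Dict String (List (String × String))) (h : d.keys.Nodup) :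
    (ls.foldl (fun d result =>
        result.2.1.foldl (fun d category =>
          if d.contains category then d.insert category (d.getD category [] ++ [(result.1, result.2.2)])
          else d.insert category [(result.1, result.2.2)]) d) d).keys.Nodup := by
  induction ls generalizing d with
  | nil => exact h
  | cons r ls ih =>
      simp only [List.foldl_cons]
      refine ih _ ?_
      rw [reformat_fold_eq]
      exact PySem.Dict.nodup_keys_foldl_insert r.2.1 (fun d c => d.getD c [] ++ [(r.1, r.2.2)]) d h

lemma nodup_keys_reformat (ls : List (String × List String × String)) :
    (result_reformat ls).keys.Nodup :=
  nodup_keys_reformat_fold ls PySem.Dict.empty (by simp [PySem.Dict.keys, PySem.Dict.empty])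

-- the sentiment-scan dict of A, characterised
lemma temp_items (d : PySem.Dict String (List (String × String))) (hnd : d.keys.Nodup) :
    (d.items.foldl (fun t p =>
        t.insert p.1 (p.2.foldl (fun passed x => if x.2 == "impolite" then false else passed) true))
      PySem.Dict.empty).items
      = d.items.map (fun p => (p.1, p.2.all (fun x => !(x.2 == "impolite")))) := by
  rw [PySem.Dict.items_foldl_insert_fresh d.items (fun p => p.1)
        (fun p => p.2.foldl (fun passed x => if x.2 == "impolite" then false else passed) true)
        PySem.Dict.empty (fun a _ => PySem.Dict.contains_empty _) hnd]
  simp only [PySem.Dict.empty, List.nil_append]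
  refine List.map_congr_left (fun p _ => ?_)
  rw [pass_fold_eq_all]
  simp

lemma temp_keys (d : PySem.Dict String (List (String × String))) (hnd : d.keys.Nodup) :
    (d.items.foldl (fun t p =>
        t.insert p.1 (p.2.foldl (fun passed x => if x.2 == "impolite" then false else passed) true))
      PySem.Dict.empty).keys = d.keys := by
  show (d.items.foldl _ PySem.Dict.empty).items.map (·.1) = d.keys
  rw [temp_items d hnd, List.map_map]
  rfl

lemma temp_contains (d : PySem.Dict String (List (String × String))) (hnd : d.keys.Nodup) (k : String) :
    (d.items.foldl (fun t p =>
        t.insert p.1 (p.2.foldl (fun passed x => if x.2 == "impolite" then false else passed) true))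
      PySem.Dict.empty).contains k = d.contains k := by
  rw [PySem.Dict.contains_eq_decide_mem_keys, PySem.Dict.contains_eq_decide_mem_keys, temp_keys d hnd]

lemma temp_getD (d : PySem.Dict String (List (String × String))) (hnd : d.keys.Nodup) (k : String)
    (info : List (String × String)) (hk : d.get? k = some info) :
    (d.items.foldl (fun t p =>
        t.insert p.1 (p.2.foldl (fun passed x => if x.2 == "impolite" then false else passed) true))
      PySem.Dict.empty).getD k false = info.all (fun x => !(x.2 == "impolite")) := by
  have hmem : (k, info) ∈ d.items := PySem.Dict.mem_items_of_get?_eq_some d hk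
  have hmem' : (k, info.all (fun x => !(x.2 == "impolite"))) ∈
      (d.items.foldl (fun t p =>
        t.insert p.1 (p.2.foldl (fun passed x => if x.2 == "impolite" then false else passed) true))
      PySem.Dict.empty).items := by
    rw [temp_items d hnd]
    exact List.mem_map.2 ⟨(k, info), hmem, rfl⟩
  exact PySem.Dict.getD_of_mem_items _ hmem' (by rw [temp_keys d hnd]; exact hnd) false

-- per-key agreement of the two pass_dic loop bodies
lemma step_eq (result_ls : List (String × List String × String))
    (pd : PySem.Dict String Bool) (key : String) :
    (if ((result_reformat result_ls).items.foldl (fun t p =>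
          t.insert p.1 (p.2.foldl (fun passed x => if x.2 == "impolite" then false else passed) true))
          PySem.Dict.empty).contains key then
       if ((result_reformat result_ls).items.foldl (fun t p =>
            t.insert p.1 (p.2.foldl (fun passed x => if x.2 == "impolite" then false else passed) true))
            PySem.Dict.empty).getD key false == true then pd.insert key true
       else pd.insert key false
     else pd.insert key false)
    = pd.insert key
        (PySem.Set.contains
          (result_ls.foldl (fun (sets : PySem.Set String × PySem.Set String) result =>
            result.2.1.foldl (fun sets category =>
              (PySem.Set.add sets.1 category,
               if result.2.2 == "impolite" then PySem.Set.add sets.2 category else sets.2)) sets)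
            (PySem.Set.empty, PySem.Set.empty)).1 key &&
         !PySem.Set.contains
          (result_ls.foldl (fun (sets : PySem.Set String × PySem.Set String) result =>
            result.2.1.foldl (fun sets category =>
              (PySem.Set.add sets.1 category,
               if result.2.2 == "impolite" then PySem.Set.add sets.2 category else sets.2)) sets)
            (PySem.Set.empty, PySem.Set.empty)).2 key) := by
  have hnd := nodup_keys_reformat result_ls
  have hpi : PassInv (result_reformat result_ls)
      (result_ls.foldl (fun (sets : PySem.Set String × PySem.Set String) result =>
        result.2.1.foldl (fun sets category =>
          (PySem.Set.add sets.1 category,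
           if result.2.2 == "impolite" then PySem.Set.add sets.2 category else sets.2)) sets)
        (PySem.Set.empty, PySem.Set.empty)).1
      (result_ls.foldl (fun (sets : PySem.Set String × PySem.Set String) result =>
        result.2.1.foldl (fun sets category =>
          (PySem.Set.add sets.1 category,
           if result.2.2 == "impolite" then PySem.Set.add sets.2 category else sets.2)) sets)
        (PySem.Set.empty, PySem.Set.empty)).2 :=
    inv_rows result_ls PySem.Dict.empty PySem.Set.empty PySem.Set.empty inv_empty
  obtain ⟨h1, h2⟩ := hpi key
  rw [set_contains_eq_decide, set_contains_eq_decide, temp_contains _ hnd]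
  by_cases hc : (result_reformat result_ls).contains key = true
  · have hsome : ∃ info, (result_reformat result_ls).get? key = some info := by
      have := PySem.Dict.contains_eq_isSome_get? (d := result_reformat result_ls) (k := key)
      rw [hc] at this
      exact Option.isSome_iff_exists.1 this.symm
    obtain ⟨info, hinfo⟩ := hsome
    have hgd : (result_reformat result_ls).getD key [] = info :=
      PySem.Dict.getD_of_get?_eq_some _ _ hinfo
    rw [hc] at h1
    rw [hgd] at h2
    rw [if_pos hc, temp_getD _ hnd key info hinfo, h2, ← h1]
    cases hI : decide (key ∈ (result_ls.foldl (fun (sets : PySem.Set String × PySem.Set String) result =>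
            result.2.1.foldl (fun sets category =>
              (PySem.Set.add sets.1 category,
               if result.2.2 == "impolite" then PySem.Set.add sets.2 category else sets.2)) sets)
            (PySem.Set.empty, PySem.Set.empty)).2) <;> simp
  · rw [if_neg hc, ← h1]
    simp [Bool.eq_false_iff.2 hc]

-- ===== VERDICT (by name: the statement is the Claim_ definition above) =====
theorem check_passed_spec : Claim_equal_check_passed := by
  intro result_ls target_label section_name _
  unfold Spec_check_passed check_passed check_passed_alt
  exact congrArg (fun pd : PySem.Dict String Bool => [(section_name, pd.items)])
    (PySem.List.foldl_congr_mem target_label _ _ PySem.Dict.empty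
      (fun acc x _ => step_eq result_ls acc x))
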